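-- pv_equiv track=rewrite | github.com/sofayam/transpod | indexer.py | has_consecutive_repetitions
-- ===== SOURCE A (Python) =====
-- def has_consecutive_repetitions(words, max_repetitions):
--     """Checks for consecutive repetitions of the same word."""
--     if not words:
--         return False
--
--     repetition_count = 1
--     for i in range(1, len(words)):
--         if words[i] == words[i-1]:
--             repetition_count += 1
--         else:
--             repetition_count = 1
--
--         if repetition_count > max_repetitions:
--             return True
--
--     return False
-- ===== SOURCE B (Python) =====
-- def has_consecutive_repetitions(words, max_repetitions):
--     """Checks whether some word is repeated more than max_repetitions times in a row,
--     by brute-force: does any window of max_repetitions+1 consecutive positions hold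
--     a single repeated word?"""
--     if not words:
--         return False
--     k = max_repetitions + 1
--     return any(words[i:i + k] == [words[i]] * k for i in range(len(words) - k + 1))
-- ===== Notes on version B (the rewrite author's own statement) =====
-- stated objective: alternative
-- what changed: Replaces A's streaming counter-with-reset loop by a brute-force sliding-window check: slice out each window of max_repetitions+1 consecutive positions and compare it with a constant list of the repeated word.
-- intended difference: On a one-element list with max_repetitions < 1, A returns False because its comparison loop never executes, while B returns True because that single word is a run of length 1 > max_repetitions, which is the intended reading of 'repeated more than max times'. — e.g. on has_consecutive_repetitions(["a"], 0): A returns false, B returns true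
import Mathlib
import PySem

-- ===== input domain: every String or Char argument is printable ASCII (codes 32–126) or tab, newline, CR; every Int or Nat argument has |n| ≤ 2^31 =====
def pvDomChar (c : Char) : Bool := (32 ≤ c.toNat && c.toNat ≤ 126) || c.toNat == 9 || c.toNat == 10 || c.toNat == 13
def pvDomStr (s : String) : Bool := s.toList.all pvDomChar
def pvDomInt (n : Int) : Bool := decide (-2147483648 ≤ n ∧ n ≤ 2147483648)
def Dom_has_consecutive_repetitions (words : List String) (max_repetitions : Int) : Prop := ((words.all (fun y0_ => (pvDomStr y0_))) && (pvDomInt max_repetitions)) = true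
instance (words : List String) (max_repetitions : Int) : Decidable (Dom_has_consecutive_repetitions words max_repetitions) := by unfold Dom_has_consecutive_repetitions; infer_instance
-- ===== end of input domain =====

-- B replaces A's streaming counter-with-reset loop by a brute-force sliding-window check:
-- does any window of max_repetitions+1 consecutive positions hold a single repeated word?
-- (alternative algorithm; O(n·max) instead of O(n) — not claimed faster)


-- ===== PORT A =====
-- one loop step of A: state (repetition_count, returned-True flag)
def hcrStep (words : List String) (max_repetitions : Int) (st : Int × Bool) (i : Int) : Int × Bool :=
  match st with
  | (cnt, true) => (cnt, true)   -- 'return True' already fired: rest of the loop is dead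
  | (cnt, false) =>
    let cnt' := if PySem.List.pyGet? words i = PySem.List.pyGet? words (i - 1) then cnt + 1 else 1
    (cnt', cnt' > max_repetitions)

def has_consecutive_repetitions (words : List String) (max_repetitions : Int) : Bool :=
  if words.isEmpty then false
  else ((PySem.List.pyRange 1 (words.length : Int) 1).foldl (hcrStep words max_repetitions) (1, false)).2

-- ===== PORT B =====
-- any(words[i:i+k] == [words[i]] * k for i in range(len(words) - k + 1)) with k = max_repetitions + 1.
-- Python's any() consumes the generator LAZILY and stops at the first True term, so the port is a
-- short-circuiting recursion over the start positions i (fuel = the range's length makes it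
-- structural; it never runs out inside the range). The 'none' branch of the match is
-- value-irrelevant: any() short-circuits at an earlier True term before any out-of-range
-- words[i] is evaluated (here '||' makes later terms inert the same way).
def altAny (words : List String) (k : Int) (stop : Int) (i : Int) (fuel : Nat) : Bool :=
  match fuel with
  | 0 => false
  | f + 1 =>
    if i < stop then
      (match PySem.List.pyGet? words i with
       | some w => decide (PySem.List.slice words (some i) (some (i + k)) = List.replicate k.toNat w)
       | none => false)
      || altAny words k stop (i + 1) f
    else false

def has_consecutive_repetitions_alt (words : List String) (max_repetitions : Int) : Bool :=
  if words.isEmpty then false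
  else
    let k := max_repetitions + 1
    altAny words k ((words.length : Int) - k + 1) 0 ((words.length : Int) - k + 1).toNat

-- ===== PRECONDITION & SPEC =====
-- On a one-element list with max_repetitions < 1, A returns False (its comparison loop never
-- executes) while B returns True (that single word is a run of length 1 > max_repetitions),
-- which is the intended reading of 'repeated more than max times'.
def D_has_consecutive_repetitions (words : List String) (max_repetitions : Int) : Prop :=
  words.length = 1 ∧ max_repetitions < 1
instance (words : List String) (max_repetitions : Int) : Decidable (D_has_consecutive_repetitions words max_repetitions) := by unfold D_has_consecutive_repetitions; infer_instance

def Spec_has_consecutive_repetitions (words : List String) (max_repetitions : Int) (out : Bool) : Prop := ¬ D_has_consecutive_repetitions words max_repetitions → out = has_consecutive_repetitions_alt words max_repetitions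
instance (words : List String) (max_repetitions : Int) (out : Bool) : Decidable (Spec_has_consecutive_repetitions words max_repetitions out) := by unfold Spec_has_consecutive_repetitions; infer_instance

def pvDiffWitness_has_consecutive_repetitions : List String × Int := (["a"], 0)
def pvDiffWitnessOut_has_consecutive_repetitions : Bool × Bool := (false, true)

-- ===== CLAIM (what is proved, stated in full; the proofs are below) =====
def Claim_unchanged_has_consecutive_repetitions : Prop := ∀ (words : List String) (max_repetitions : Int), Dom_has_consecutive_repetitions words max_repetitions → Spec_has_consecutive_repetitions words max_repetitions (has_consecutive_repetitions words max_repetitions)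
def Claim_changed_has_consecutive_repetitions : Prop := Dom_has_consecutive_repetitions (pvDiffWitness_has_consecutive_repetitions.1) (pvDiffWitness_has_consecutive_repetitions.2) ∧ D_has_consecutive_repetitions (pvDiffWitness_has_consecutive_repetitions.1) (pvDiffWitness_has_consecutive_repetitions.2) ∧ has_consecutive_repetitions (pvDiffWitness_has_consecutive_repetitions.1) (pvDiffWitness_has_consecutive_repetitions.2) = pvDiffWitnessOut_has_consecutive_repetitions.1 ∧ has_consecutive_repetitions_alt (pvDiffWitness_has_consecutive_repetitions.1) (pvDiffWitness_has_consecutive_repetitions.2) = pvDiffWitnessOut_has_consecutive_repetitions.2 ∧ pvDiffWitnessOut_has_consecutive_repetitions.1 ≠ pvDiffWitnessOut_has_consecutive_repetitions.2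
def Claim_exact_has_consecutive_repetitions : Prop := ∀ (words : List String) (max_repetitions : Int), Dom_has_consecutive_repetitions words max_repetitions → D_has_consecutive_repetitions words max_repetitions → has_consecutive_repetitions words max_repetitions ≠ has_consecutive_repetitions_alt words max_repetitions

-- ===== LEMMAS AND PROOFS =====

-- length of the maximal prefix of a list equal to a given word
def lead (w : String) : List String → Nat
  | [] => 0
  | x :: xs => if x = w then lead w xs + 1 else 0

-- common reference form of both programs: recursion over maximal runs
def refGo (m : Int) : List String → Bool
  | [] => false
  | w :: rest =>
    (((1 + lead w rest : Nat) : Int) > m) || refGo m (rest.drop (lead w rest))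
termination_by l => l.length
decreasing_by
  simp only [List.length_cons, List.length_drop]
  omega

-- structural form of A's loop: prev word, current count
def aRec (m : Int) (prev : String) (cnt : Int) : List String → Bool
  | [] => false
  | w :: rest =>
    let c := if w = prev then cnt + 1 else 1
    if c > m then true else aRec m w c rest

-- structural form of B's generator: one window test per start position
def winR (kn : Nat) : List String → Bool
  | [] => false
  | w :: rest => decide ((w :: rest).take kn = List.replicate kn w) || winR kn rest

-- ---- A-side lemmas ----

-- once the found flag is set, the rest of A's fold is inert
theorem foldl_hcrStep_true (ws : List String) (m : Int) (l : List Int) (c : Int) :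
    l.foldl (hcrStep ws m) (c, true) = (c, true) := by
  induction l generalizing c with
  | nil => rfl
  | cons x xs ih => simp [List.foldl, hcrStep, ih]

-- A's indexed fold over pyRange equals the structural recursion aRec
theorem foldA_eq_aRec (t : List String) (pre : List String) (h : String) (m cnt : Int) :
    ((PySem.List.pyRange ((pre.length : Int) + 1) (((pre ++ h :: t).length : Nat) : Int) 1).foldl
      (hcrStep (pre ++ h :: t) m) (cnt, false)).2 = aRec m h cnt t := by
  induction t generalizing pre h cnt with
  | nil =>
    rw [PySem.List.pyRange_one_eq_nil (by simp)]
    rfl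
  | cons w rest ih =>
    have hlen : (((pre ++ h :: w :: rest).length : Nat) : Int) = (pre.length : Int) + 2 + rest.length := by
      simp only [List.length_append, List.length_cons]
      push_cast
      ring
    rw [PySem.List.pyRange_one_cons (by rw [hlen]; omega)]
    simp only [List.foldl]
    have hget1 : PySem.List.pyGet? (pre ++ h :: w :: rest) ((pre.length : Int) + 1)
        = some w := by
      rw [show ((pre.length : Int) + 1) = (((pre.length + 1 : Nat)) : Int) from by push_cast; ring]
      rw [PySem.List.pyGet?_natCast]
      rw [List.getElem?_append_right (by omega)]
      simp
    rw [show hcrStep (pre ++ h :: w :: rest) m (cnt, false) ((pre.length : Int) + 1)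
        = (if w = h then cnt + 1 else 1,
           decide ((if w = h then cnt + 1 else 1) > m)) from by
      simp [hcrStep, hget1]]
    by_cases hcm : (if w = h then cnt + 1 else 1) > m
    · rw [decide_eq_true hcm, foldl_hcrStep_true]
      simp [aRec, hcm]
    · simp only [hcm, decide_false]
      have hre : pre ++ h :: w :: rest = (pre ++ [h]) ++ w :: rest := by simp
      have hidx : (pre.length : Int) + 1 + 1 = (((pre ++ [h]).length : Nat) : Int) + 1 := by
        simp only [List.length_append, List.length_cons, List.length_nil]
        push_cast
        ring
      rw [hre, hidx, ih (pre ++ [h]) w (if w = h then cnt + 1 else 1)]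
      simp [aRec, hcm]

theorem portA_eq_aRec (h : String) (t : List String) (m : Int) :
    has_consecutive_repetitions (h :: t) m = aRec m h 1 t := by
  unfold has_consecutive_repetitions
  have := foldA_eq_aRec t [] h m 1
  simpa using this

-- the run-wise characterisation of A's counter loop, valid while cnt has not exceeded m
theorem aRec_eq_run (t : List String) (h : String) (cnt m : Int)
    (h1 : 1 ≤ cnt) (h2 : cnt ≤ m) :
    aRec m h cnt t = ((cnt + (lead h t : Int) > m) || refGo m (t.drop (lead h t))) := by
  induction t generalizing h cnt with
  | nil =>
    simp [aRec, lead, refGo]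
    omega
  | cons w rest ih =>
    by_cases hw : w = h
    · subst hw
      rw [show aRec m w cnt (w :: rest)
            = (if cnt + 1 > m then true else aRec m w (cnt + 1) rest) from by simp [aRec]]
      rw [show lead w (w :: rest) = lead w rest + 1 from by simp [lead]]
      rw [List.drop_succ_cons]
      by_cases hcm : cnt + 1 > m
      · rw [if_pos hcm]
        symm
        rw [Bool.or_eq_true]
        left
        rw [decide_eq_true_eq]
        push_cast
        omega
      · rw [if_neg hcm]
        rw [ih w (cnt + 1) (by omega) (by omega)]
        have hdec : (decide (cnt + 1 + (lead w rest : Int) > m))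
            = (decide (cnt + ((lead w rest + 1 : Nat) : Int) > m)) := by
          rw [decide_eq_decide]; push_cast; omega
        rw [hdec]
    · rw [show aRec m h cnt (w :: rest)
            = (if (1:Int) > m then true else aRec m w 1 rest) from by simp [aRec, hw]]
      rw [show lead h (w :: rest) = 0 from by simp [lead, hw]]
      rw [if_neg (by omega : ¬ ((1:Int) > m))]
      rw [ih w 1 (by omega) (by omega)]
      simp only [Nat.cast_zero, List.drop_zero, add_zero]
      rw [show (decide (cnt > m)) = false from by simp only [decide_eq_false_iff_not]; omega]
      rw [Bool.false_or]
      rw [show refGo m (w :: rest)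
            = ((((1 + lead w rest : Nat) : Int) > m) || refGo m (rest.drop (lead w rest))) from by
          rw [refGo]]
      have hdec : (decide ((1 : Int) + (lead w rest : Int) > m))
          = (decide ((((1 + lead w rest : Nat)) : Int) > m)) := by
        rw [decide_eq_decide]; push_cast; omega
      rw [hdec]

-- ---- B-side lemmas ----

-- a window at the head of the list is all-equal iff it fits inside the leading run
theorem take_replicate_iff (kn : Nat) : ∀ (w : String) (rest : List String),
    ((w :: rest).take kn = List.replicate kn w) ↔ kn ≤ 1 + lead w rest := by
  induction kn with
  | zero => intro w rest; simp
  | succ k ih =>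
    intro w rest
    rw [List.take_succ_cons, List.replicate_succ, List.cons_eq_cons]
    match rest with
    | [] =>
      simp only [List.take_nil, lead, true_and]
      constructor
      · intro he
        have := congrArg List.length he
        simp at this
        omega
      · intro hk
        have : k = 0 := by omega
        subst this
        rfl
    | x :: rs =>
      by_cases hx : x = w
      · subst hx
        rw [show lead x (x :: rs) = lead x rs + 1 from by simp [lead]]
        rw [ih x rs]
        constructor
        · rintro ⟨_, h2⟩; omega
        · intro hk; exact ⟨rfl, by omega⟩
      · rw [show lead w (x :: rs) = 0 from by simp [lead, hx]]
        constructor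
        · rintro ⟨_, h2⟩
          match k with
          | 0 => omega
          | k' + 1 =>
            rw [List.take_succ_cons, List.replicate_succ, List.cons_eq_cons] at h2
            exact absurd h2.1 hx
        · intro hk
          have : k = 0 := by omega
          subst this
          exact ⟨rfl, rfl⟩

-- the leading run is no longer than the list
theorem lead_le_length (w : String) : ∀ (l : List String), lead w l ≤ l.length := by
  intro l
  induction l with
  | nil => simp [lead]
  | cons x xs ih =>
    simp only [lead, List.length_cons]
    split <;> omega

-- no window fits in a list shorter than the window
theorem winR_big (kn : Nat) : ∀ (l : List String), l.length < kn → winR kn l = false := by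
  intro l
  induction l with
  | nil => intro _; rfl
  | cons w rest ih =>
    intro hlen
    simp only [List.length_cons] at hlen
    rw [winR, ih (by omega), Bool.or_false]
    rw [decide_eq_false_iff_not, take_replicate_iff]
    have hle := lead_le_length w rest
    omega

-- winR consumes a whole leading run at once
theorem take_rep_decide (kn : Nat) (w : String) (rest : List String) :
    (decide ((w :: rest).take kn = List.replicate kn w)) = decide (kn ≤ 1 + lead w rest) := by
  rw [decide_eq_decide]
  exact take_replicate_iff kn w rest

theorem winR_run (kn : Nat) : ∀ (rest : List String) (w : String),
    winR kn (w :: rest)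
      = (decide (kn ≤ 1 + lead w rest) || winR kn (rest.drop (lead w rest))) := by
  intro rest
  induction rest with
  | nil =>
    intro w
    rw [winR, winR, take_rep_decide]
    simp [lead, winR]
  | cons x rs ih =>
    intro w
    by_cases hx : x = w
    · subst hx
      rw [winR, take_rep_decide]
      rw [show lead x (x :: rs) = lead x rs + 1 from by simp [lead]]
      rw [ih x, List.drop_succ_cons]
      by_cases hb : kn ≤ 1 + lead x rs
      · rw [decide_eq_true hb, decide_eq_true (by omega : kn ≤ 1 + (lead x rs + 1))]
        simp
      · rw [decide_eq_false hb]
        rw [Bool.false_or]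
    · rw [winR, take_rep_decide]
      rw [show lead w (x :: rs) = 0 from by simp [lead, hx]]
      simp only [List.drop_zero]

-- winR with window m+1 is the run recursion refGo
theorem winR_eq_refGo (m : Int) (kn : Nat) (hk : (kn : Int) = m + 1) :
    ∀ (l : List String), winR kn l = refGo m l
  | [] => by rw [winR, refGo]
  | w :: rest => by
    rw [winR_run kn rest w, refGo,
        winR_eq_refGo m kn hk (rest.drop (lead w rest))]
    have hdec : (decide (kn ≤ 1 + lead w rest))
        = (decide (((1 + lead w rest : Nat) : Int) > m)) := by
      rw [decide_eq_decide]
      push_cast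
      omega
    rw [hdec]
termination_by l => l.length
decreasing_by
  simp only [List.length_cons, List.length_drop]
  omega

-- the lazy any-recursion computes List.any over the materialised range
theorem altAny_eq_any (words : List String) (k stop : Int) :
    ∀ (fuel : Nat) (i : Int), (stop - i).toNat ≤ fuel →
      altAny words k stop i fuel
        = (PySem.List.pyRange i stop 1).any (fun j =>
            match PySem.List.pyGet? words j with
            | some w => decide (PySem.List.slice words (some j) (some (j + k))
                = List.replicate k.toNat w)
            | none => false) := by
  intro fuel
  induction fuel with
  | zero =>
    intro i hf
    rw [PySem.List.pyRange_one_eq_nil (by omega)]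
    rfl
  | succ f ih =>
    intro i hf
    by_cases hi : i < stop
    · rw [PySem.List.pyRange_one_cons hi, List.any_cons]
      rw [show altAny words k stop i (f + 1)
            = ((match PySem.List.pyGet? words i with
                | some w => decide (PySem.List.slice words (some i) (some (i + k))
                    = List.replicate k.toNat w)
                | none => false)
               || altAny words k stop (i + 1) f) from by
          rw [altAny]
          rw [if_pos hi]]
      rw [ih (i + 1) (by omega)]
    · rw [PySem.List.pyRange_one_eq_nil (by omega)]
      rw [altAny, if_neg hi]
      rfl

-- B's any-over-range generator equals the structural recursion winR (k ≥ 1)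
theorem anyWin (k : Int) (hk : 1 ≤ k) : ∀ (l : List String),
    ((PySem.List.pyRange 0 ((l.length : Int) - k + 1) 1).any fun i =>
      match PySem.List.pyGet? l i with
      | some w => decide (PySem.List.slice l (some i) (some (i + k)) = List.replicate k.toNat w)
      | none => false) = winR k.toNat l := by
  intro l
  induction l with
  | nil =>
    rw [PySem.List.pyRange_one_eq_nil (by simp; omega)]
    rfl
  | cons w rest ih =>
    by_cases hN : ((w :: rest).length : Int) - k + 1 ≤ 0
    · rw [PySem.List.pyRange_one_eq_nil hN]
      rw [winR_big k.toNat (w :: rest) (by simp at hN ⊢; omega)]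
      rfl
    · rw [PySem.List.pyRange_one_cons (by omega)]
      rw [List.any_cons]
      -- head term: the window at position 0
      have hhead : (match PySem.List.pyGet? (w :: rest) 0 with
          | some w' => decide (PySem.List.slice (w :: rest) (some 0) (some (0 + k))
              = List.replicate k.toNat w')
          | none => false)
          = decide ((w :: rest).take k.toNat = List.replicate k.toNat w) := by
        rw [PySem.List.pyGet?_zero_cons]
        show decide (PySem.List.slice (w :: rest) (some 0) (some (0 + k))
            = List.replicate k.toNat w)
          = decide ((w :: rest).take k.toNat = List.replicate k.toNat w)
        rw [show (0 : Int) + k = k from by ring]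
        rw [PySem.List.slice_zero_start, decide_eq_decide,
            PySem.List.slice_to (w :: rest) (by omega : (0:Int) ≤ k)]
      rw [hhead]
      -- tail: shift every start position down by one
      have htail : ((PySem.List.pyRange 1 (((w :: rest).length : Int) - k + 1) 1).any fun i =>
          match PySem.List.pyGet? (w :: rest) i with
          | some w' => decide (PySem.List.slice (w :: rest) (some i) (some (i + k))
              = List.replicate k.toNat w')
          | none => false)
          = ((PySem.List.pyRange 0 ((rest.length : Int) - k + 1) 1).any fun i =>
          match PySem.List.pyGet? rest i with
          | some w' => decide (PySem.List.slice rest (some i) (some (i + k))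
              = List.replicate k.toNat w')
          | none => false) := by
        rw [PySem.List.pyRange_one 1, PySem.List.pyRange_one 0]
        have hM : (((w :: rest).length : Int) - k + 1 - 1).toNat
            = ((rest.length : Int) - k + 1 - 0).toNat := by
          simp only [List.length_cons]
          omega
        rw [hM, List.any_map, List.any_map]
        apply PySem.List.any_congr_mem
        intro j hj
        simp only [Function.comp_apply]
        have h1j : (1 : Int) + (j : Int) = ((j + 1 : Nat) : Int) := by push_cast; ring
        have h0j : (0 : Int) + (j : Int) = ((j : Nat) : Int) := by ring
        rw [h1j, h0j]
        rw [show PySem.List.pyGet? (w :: rest) ((j + 1 : Nat) : Int)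
              = PySem.List.pyGet? rest (j : Nat) from by
            rw [PySem.List.pyGet?_natCast, PySem.List.pyGet?_natCast]
            simp]
        have hsl : PySem.List.slice (w :: rest) (some ((j + 1 : Nat) : Int))
              (some (((j + 1 : Nat) : Int) + k))
            = PySem.List.slice rest (some ((j : Nat) : Int)) (some (((j : Nat) : Int) + k)) := by
          rw [show ((j + 1 : Nat) : Int) + k = ((j + 1 : Nat) : Int) + ((k.toNat : Nat) : Int) from by
                omega,
              show ((j : Nat) : Int) + k = ((j : Nat) : Int) + ((k.toNat : Nat) : Int) from by
                omega]
          rw [PySem.List.slice_natCast_add, PySem.List.slice_natCast_add]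
          rw [show (w :: rest).drop (j + 1) = rest.drop j from by simp]
        rw [hsl]
      rw [show (0 : Int) + 1 = (1 : Int) from by ring] at *
      rw [htail, ih]
      rw [show winR k.toNat (w :: rest)
            = (decide ((w :: rest).take k.toNat = List.replicate k.toNat w)
                || winR k.toNat rest) from by rw [winR]]

-- B computes the run recursion refGo, for every max_repetitions
theorem altB_eq_refGo (words : List String) (m : Int) :
    has_consecutive_repetitions_alt words m = refGo m words := by
  match words with
  | [] => rw [show has_consecutive_repetitions_alt [] m = false from rfl, refGo]
  | h :: t =>
    rw [show has_consecutive_repetitions_alt (h :: t) m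
          = ((PySem.List.pyRange 0 (((h :: t).length : Int) - (m + 1) + 1) 1).any fun i =>
              match PySem.List.pyGet? (h :: t) i with
              | some w => decide (PySem.List.slice (h :: t) (some i) (some (i + (m + 1)))
                  = List.replicate (m + 1).toNat w)
              | none => false) from by
        unfold has_consecutive_repetitions_alt
        rw [if_neg (by simp)]
        exact altAny_eq_any (h :: t) (m + 1) (((h :: t).length : Int) - (m + 1) + 1) _ 0
          (by omega)]
    by_cases hm : 0 ≤ m
    · rw [anyWin (m + 1) (by omega) (h :: t)]
      exact winR_eq_refGo m (m + 1).toNat (by omega) (h :: t)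
    · -- m < 0: both sides are true on a nonempty list.
      -- B: the window starting at the LAST index is empty (Python stop ≤ start after clamping),
      --    and [words[i]] * (m+1) is empty too.
      have hrefGo : refGo m (h :: t) = true := by
        rw [refGo, Bool.or_eq_true]
        left
        rw [decide_eq_true_eq]
        have : (0 : Int) ≤ ((1 + lead h t : Nat) : Int) := by positivity
        omega
      rw [hrefGo, List.any_eq_true]
      refine ⟨(t.length : Int), ?_, ?_⟩
      · rw [PySem.List.mem_pyRange_one]
        constructor
        · positivity
        · simp only [List.length_cons]
          push_cast
          omega
      · rw [show PySem.List.pyGet? (h :: t) (t.length : Int)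
              = some ((h :: t).getLast (by simp)) from by
            rw [PySem.List.pyGet?_natCast]
            rw [List.getElem?_eq_getElem (by simp)]
            rw [List.getLast_eq_getElem]
            simp
            rfl]
        have hrep : List.replicate (m + 1).toNat ((h :: t).getLast (by simp))
            = ([] : List String) := by
          rw [show (m + 1).toNat = 0 from by omega]
          rfl
        have hsl : PySem.List.slice (h :: t) (some (t.length : Int))
            (some ((t.length : Int) + (m + 1))) = ([] : List String) := by
          apply List.eq_nil_of_length_eq_zero
          rw [PySem.List.length_slice]
          have h1 : PySem.List.clampIdx (h :: t).length (t.length : Int) = t.length := by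
            simp [PySem.List.clampIdx]
          have h2 : PySem.List.clampIdx (h :: t).length ((t.length : Int) + (m + 1))
              ≤ t.length := by
            simp only [PySem.List.clampIdx, List.length_cons]
            split_ifs <;> omega
          omega
        show decide (PySem.List.slice (h :: t) (some (t.length : Int))
            (some ((t.length : Int) + (m + 1)))
            = List.replicate (m + 1).toNat ((h :: t).getLast (by simp))) = true
        rw [hrep, hsl]
        simp

-- ===== VERDICT (by name: the statement is the Claim_ definition above) =====
theorem has_consecutive_repetitions_spec : Claim_unchanged_has_consecutive_repetitions := by
  intro words m _ hD
  rw [altB_eq_refGo]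
  match words with
  | [] => simp [has_consecutive_repetitions, refGo]
  | h :: t =>
    rw [portA_eq_aRec]
    by_cases hm : 1 ≤ m
    · rw [aRec_eq_run t h 1 m (le_refl 1) hm]
      rw [show refGo m (h :: t)
            = ((((1 + lead h t : Nat) : Int) > m) || refGo m (t.drop (lead h t))) from by
          rw [refGo]]
      have hdec : (decide ((1 : Int) + (lead h t : Int) > m))
          = (decide ((((1 + lead h t : Nat)) : Int) > m)) := by
        rw [decide_eq_decide]; push_cast; omega
      rw [hdec]
    · -- m < 1: A's check fires on the first iteration; by ¬D, t is nonempty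
      have ht : t ≠ [] := by
        intro he
        exact hD ⟨by simp [he], by omega⟩
      match t, ht with
      | w :: rest, _ =>
        have hgt : (if w = h then (1:Int) + 1 else 1) > m := by split <;> omega
        rw [show aRec m h 1 (w :: rest)
              = (if (if w = h then (1:Int) + 1 else 1) > m then true
                 else aRec m w (if w = h then (1:Int) + 1 else 1) rest) from by simp [aRec]]
        rw [if_pos hgt, refGo]
        symm
        rw [Bool.or_eq_true]
        left
        rw [decide_eq_true_eq]
        push_cast
        omega

theorem has_consecutive_repetitions_changed : Claim_changed_has_consecutive_repetitions := by
  unfold Claim_changed_has_consecutive_repetitions; decide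

theorem has_consecutive_repetitions_tight : Claim_exact_has_consecutive_repetitions := by
  intro words m _ hD
  obtain ⟨hlen, hm⟩ := hD
  match words, hlen with
  | [w], _ =>
    rw [portA_eq_aRec, altB_eq_refGo, refGo]
    intro hcontra
    rw [show aRec m w 1 [] = false from rfl] at hcontra
    simp [lead, refGo] at hcontra
    omega
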